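-- pv_equiv track=rewrite | github.com/steve2972/Algorithms | Programmers/42626.py | solution_old
-- ===== SOURCE A (Python) =====
-- def heapify(arr, i):
--     l, r = 2*i+1, 2*i+2
--
--     if r < len(arr):
--         if arr[i] > arr[l] or arr[i] > arr[r]:
--             if arr[l] < arr[r]:
--                 arr[i], arr[l] = arr[l], arr[i]
--                 heapify(arr, l)
--             else:
--                 arr[i], arr[r] = arr[r], arr[i]
--                 heapify(arr, r)
--     elif l < len(arr):
--         if arr[l] < arr[i]:
--             arr[i], arr[l] = arr[l], arr[i]
--             heapify(arr, l)
--
-- def build(arr):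
--     for i in range(len(arr)//2, -1, -1):
--         heapify(arr, i)
--
-- def pop(arr):
--     popped = arr[0]
--     arr[0] = arr[-1]
--     arr = arr[:-1]
--     heapify(arr, 0)
--     return popped, arr
--
-- def insert(arr, n):
--     arr.append(n)
--     cur = len(arr) - 1
--     while arr[cur] < arr[(cur - 2 + (cur%2))//2]:
--         nc = (cur - 2 + (cur%2))//2
--         arr[cur], arr[nc] = arr[nc], arr[cur]
--         cur = (cur - 2 + (cur%2))//2
--
-- def solution_old(arr, k):
--     if min(arr) >= k: return 0
--     build(arr)
--     num = 0
--     while arr[0] < k: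
--         a, arr= pop(arr)
--         b, arr = pop(arr)
--         if a >= k: return num
--         new = a + 2*b
--         insert(arr, new)
--         if len(arr) == 1:
--             return -1
--         num += 1
--     return num
-- ===== SOURCE B (Python) =====
-- # Min-heap simulation of the mixing process on one list kept in place:
-- # iterative sift-down, O(1) end-pops, sift-up loop -- no recursion, no slice copies.
-- # The input list is not mutated (A heapifies its argument in place).
--
-- def _sift_down(h, i):
--     n = len(h)
--     while True:
--         l = 2 * i + 1
--         r = l + 1
--         if r < n:
--             c = l if h[l] < h[r] else r
--         elif l < n:
--             c = l
--         else:
--             return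
--         if h[c] < h[i]:
--             h[i], h[c] = h[c], h[i]
--             i = c
--         else:
--             return
--
-- def solution_old(arr, k):
--     if min(arr) >= k:
--         return 0
--     h = list(arr)
--     for i in range(len(h) // 2, -1, -1):
--         _sift_down(h, i)
--     num = 0
--     while h[0] < k:
--         a = h[0]
--         h[0] = h[-1]
--         h.pop()
--         _sift_down(h, 0)
--         b = h[0]
--         h[0] = h[-1]
--         h.pop()
--         _sift_down(h, 0)
--         h.append(a + 2 * b)
--         cur = len(h) - 1
--         while h[cur] < h[(cur - 1) // 2]:
--             p = (cur - 1) // 2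
--             h[cur], h[p] = h[p], h[cur]
--             cur = p
--         if len(h) == 1:
--             return -1
--         num += 1
--     return num
-- ===== Notes on version B (the rewrite author's own statement) =====
-- stated objective: faster
-- what changed: B keeps the heap in one list updated in place with an iterative single-smaller-child sift-down, O(1) end-pops (h[0]=h[-1]; h.pop()) and an inline sift-up loop, instead of A's recursive 3-branch heapify plus an O(n) slice-copy rebuild of the list on every pop; Pre_ excludes only the inputs where A raises (min of an empty list, IndexError popping from a 1-element heap).
-- outside the precondition, e.g. on solution_old([], 5): A raises ValueError, B raises ValueError; on solution_old([1], 5): A raises IndexError, B raises IndexError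
import Mathlib
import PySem

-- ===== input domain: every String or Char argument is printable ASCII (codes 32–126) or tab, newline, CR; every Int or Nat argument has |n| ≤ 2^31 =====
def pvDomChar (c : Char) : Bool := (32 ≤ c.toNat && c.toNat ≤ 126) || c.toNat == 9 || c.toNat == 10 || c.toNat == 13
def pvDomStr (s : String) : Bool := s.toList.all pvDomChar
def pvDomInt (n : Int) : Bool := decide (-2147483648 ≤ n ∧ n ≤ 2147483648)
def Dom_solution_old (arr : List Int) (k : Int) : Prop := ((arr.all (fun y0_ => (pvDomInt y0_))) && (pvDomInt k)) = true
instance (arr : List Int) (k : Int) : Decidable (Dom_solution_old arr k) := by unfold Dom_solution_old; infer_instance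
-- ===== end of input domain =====

-- B replaces A's recursive heapify and O(n) slice-copying pops by iterative sift-down,
-- O(1) end-pops and an in-place sift-up loop on one list; return values are proved equal.
-- Side effects differ: the Python A heapifies its argument list in place, B does not mutate it.

-- ===== PORT A =====
def heapifyA_go (fuel : Nat) (arr : List Int) (i : Nat) : List Int :=
  match fuel with
  | 0 => arr
  | fuel+1 =>
    if 2*i+2 < arr.length then
      if arr.getD i 0 > arr.getD (2*i+1) 0 ∨ arr.getD i 0 > arr.getD (2*i+2) 0 then
        if arr.getD (2*i+1) 0 < arr.getD (2*i+2) 0 then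
          heapifyA_go fuel ((arr.set i (arr.getD (2*i+1) 0)).set (2*i+1) (arr.getD i 0)) (2*i+1)
        else
          heapifyA_go fuel ((arr.set i (arr.getD (2*i+2) 0)).set (2*i+2) (arr.getD i 0)) (2*i+2)
      else arr
    else if 2*i+1 < arr.length then
      if arr.getD (2*i+1) 0 < arr.getD i 0 then
        heapifyA_go fuel ((arr.set i (arr.getD (2*i+1) 0)).set (2*i+1) (arr.getD i 0)) (2*i+1)
      else arr
    else arr

-- fuel (arr.length + 1) bounds the recursion depth: the index strictly grows and stays < length
def heapifyA (arr : List Int) (i : Nat) : List Int := heapifyA_go (arr.length + 1) arr i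

def buildA_go (arr : List Int) (j : Nat) : List Int :=
  match j with
  | 0 => arr
  | j+1 => buildA_go (heapifyA arr j) j

def buildA (arr : List Int) : List Int := buildA_go arr (arr.length / 2 + 1)

def popA (arr : List Int) : Int × List Int :=
  (arr.getD 0 0, heapifyA ((arr.set 0 (arr.getD (arr.length - 1) 0)).dropLast) 0)

def insertA_go (fuel : Nat) (arr : List Int) (cur : Int) : List Int :=
  match fuel with
  | 0 => arr
  | fuel+1 =>
    let p := PySem.Int.floordiv (cur - 2 + PySem.Int.mod cur 2) 2
    if PySem.List.pyGetD arr cur 0 < PySem.List.pyGetD arr p 0 then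
      insertA_go fuel
        (PySem.List.pySetD (PySem.List.pySetD arr cur (PySem.List.pyGetD arr p 0)) p
          (PySem.List.pyGetD arr cur 0)) p
    else arr

def insertA (arr : List Int) (v : Int) : List Int :=
  insertA_go ((arr ++ [v]).length + 1) (arr ++ [v]) ((arr ++ [v]).length - 1)

def loopA (fuel : Nat) (arr : List Int) (k num : Int) : Int :=
  match fuel with
  | 0 => 0
  | fuel+1 =>
    if arr.getD 0 0 < k then
      let pa := popA arr
      let pb := popA pa.2
      if pa.1 ≥ k then num
      else
        let arr3 := insertA pb.2 (pa.1 + 2*pb.1)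
        if arr3.length = 1 then -1
        else loopA fuel arr3 k (num + 1)
    else num

def solution_old (arr : List Int) (k : Int) : Int :=
  match PySem.List.min? arr (fun x => x) with
  | none => 0
  | some m => if m ≥ k then 0 else loopA (arr.length + 1) (buildA arr) k 0

-- ===== PORT B =====
def siftDownB_go (fuel : Nat) (h : List Int) (i : Nat) : List Int :=
  match fuel with
  | 0 => h
  | fuel+1 =>
    if 2*i+2 < h.length then
      let c := if h.getD (2*i+1) 0 < h.getD (2*i+2) 0 then 2*i+1 else 2*i+2
      if h.getD c 0 < h.getD i 0 then
        siftDownB_go fuel ((h.set i (h.getD c 0)).set c (h.getD i 0)) c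
      else h
    else if 2*i+1 < h.length then
      if h.getD (2*i+1) 0 < h.getD i 0 then
        siftDownB_go fuel ((h.set i (h.getD (2*i+1) 0)).set (2*i+1) (h.getD i 0)) (2*i+1)
      else h
    else h

-- fuel (h.length + 1) bounds Source B's while loop: i strictly grows and stays < length
def siftDownB (h : List Int) (i : Nat) : List Int := siftDownB_go (h.length + 1) h i

def buildB_go (h : List Int) (j : Nat) : List Int :=
  match j with
  | 0 => h
  | j+1 => buildB_go (siftDownB h j) j

-- Source B's `while h[cur] < h[(cur-1)//2]` sift-up loop; fuel bounds the while loop,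
-- Python's negative indexing is exact via PySem.List.pyGetD/pySetD.
def siftUpB_go (fuel : Nat) (h : List Int) (cur : Int) : List Int :=
  match fuel with
  | 0 => h
  | fuel+1 =>
    let p := PySem.Int.floordiv (cur - 1) 2
    if PySem.List.pyGetD h cur 0 < PySem.List.pyGetD h p 0 then
      siftUpB_go fuel
        (PySem.List.pySetD (PySem.List.pySetD h cur (PySem.List.pyGetD h p 0)) p
          (PySem.List.pyGetD h cur 0)) p
    else h

-- h[0] = h[-1]; h.pop(); _sift_down(h, 0)   (h[-1] exact for nonempty h; [] is outside Pre_)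
def popB (h : List Int) : List Int :=
  siftDownB ((h.set 0 (h.getD (h.length - 1) 0)).dropLast) 0

def loopB (fuel : Nat) (h : List Int) (k num : Int) : Int :=
  match fuel with
  | 0 => 0
  | fuel+1 =>
    if h.getD 0 0 < k then
      let a := h.getD 0 0
      let h1 := popB h
      let b := h1.getD 0 0
      let h2 := popB h1
      let h3 := h2 ++ [a + 2*b]
      let h4 := siftUpB_go (h3.length + 1) h3 ((h3.length : Int) - 1)
      if h4.length = 1 then -1 else loopB fuel h4 k (num + 1)
    else num

def solution_old_alt (arr : List Int) (k : Int) : Int :=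
  match PySem.List.min? arr (fun x => x) with
  | none => 0
  | some m =>
    if m ≥ k then 0
    else loopB (arr.length + 1) (buildB_go arr (arr.length / 2 + 1)) k 0

-- ===== PRECONDITION & SPEC =====
-- Pre_ excludes exactly the inputs where the Python A raises: min([]) (ValueError) on an
-- empty list, and IndexError from the second pop when a single-element heap has arr[0] < k.
def Pre_solution_old (arr : List Int) (k : Int) : Prop :=
  arr ≠ [] ∧ (arr.length = 1 → k ≤ arr.getD 0 0)
instance (arr : List Int) (k : Int) : Decidable (Pre_solution_old arr k) := by
  unfold Pre_solution_old; infer_instance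
def pvWitness_solution_old : List Int × Int := ([1, 2, 3, 9, 10, 12], 7)
def Spec_solution_old (arr : List Int) (k : Int) (out : Int) : Prop := out = solution_old_alt arr k
instance (arr : List Int) (k : Int) (out : Int) : Decidable (Spec_solution_old arr k out) := by
  unfold Spec_solution_old; infer_instance

-- ===== CLAIM =====
def Claim_equal_solution_old : Prop := ∀ (arr : List Int) (k : Int), Dom_solution_old arr k → Pre_solution_old arr k → Spec_solution_old arr k (solution_old arr k)

-- ===== LEMMAS AND PROOFS =====
theorem heapifyGo_eq (fuel : Nat) (h : List Int) (i : Nat) :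
    heapifyA_go fuel h i = siftDownB_go fuel h i := by
  induction fuel generalizing h i with
  | zero => rfl
  | succ fuel ih =>
    rw [heapifyA_go, siftDownB_go]
    by_cases hr : 2*i+2 < h.length
    · rw [if_pos hr, if_pos hr]
      by_cases hlr : h.getD (2*i+1) 0 < h.getD (2*i+2) 0
      · simp only [if_pos hlr]
        by_cases hsw : h.getD (2*i+1) 0 < h.getD i 0
        · rw [if_pos (by omega : h.getD i 0 > h.getD (2*i+1) 0 ∨ h.getD i 0 > h.getD (2*i+2) 0),
              if_pos hsw, ih]
        · rw [if_neg (by omega : ¬(h.getD i 0 > h.getD (2*i+1) 0 ∨ h.getD i 0 > h.getD (2*i+2) 0)),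
              if_neg hsw]
      · simp only [if_neg hlr]
        by_cases hsw : h.getD (2*i+2) 0 < h.getD i 0
        · rw [if_pos (by omega : h.getD i 0 > h.getD (2*i+1) 0 ∨ h.getD i 0 > h.getD (2*i+2) 0),
              if_pos hsw, ih]
        · rw [if_neg (by omega : ¬(h.getD i 0 > h.getD (2*i+1) 0 ∨ h.getD i 0 > h.getD (2*i+2) 0)),
              if_neg hsw]
    · rw [if_neg hr, if_neg hr]
      by_cases hl : 2*i+1 < h.length
      · rw [if_pos hl, if_pos hl]
        by_cases hsw : h.getD (2*i+1) 0 < h.getD i 0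
        · rw [if_pos hsw, if_pos hsw, ih]
        · rw [if_neg hsw, if_neg hsw]
      · rw [if_neg hl, if_neg hl]

theorem heapify_eq (h : List Int) (i : Nat) : heapifyA h i = siftDownB h i :=
  heapifyGo_eq (h.length + 1) h i

theorem build_eq (j : Nat) (h : List Int) : buildA_go h j = buildB_go h j := by
  induction j generalizing h with
  | zero => rfl
  | succ j ih => rw [buildA_go, buildB_go, heapify_eq, ih]

theorem parent_eq (c : Int) :
    PySem.Int.floordiv (c - 2 + PySem.Int.mod c 2) 2 = PySem.Int.floordiv (c - 1) 2 := by
  rw [PySem.Int.mod_eq_emod_of_pos (by norm_num),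
      PySem.Int.floordiv_eq_ediv_of_pos (by norm_num),
      PySem.Int.floordiv_eq_ediv_of_pos (by norm_num)]
  omega

theorem siftUp_eq (fuel : Nat) (h : List Int) (cur : Int) :
    insertA_go fuel h cur = siftUpB_go fuel h cur := by
  induction fuel generalizing h cur with
  | zero => rfl
  | succ fuel ih =>
    rw [insertA_go, siftUpB_go]
    simp only [parent_eq]
    split
    · exact ih _ _
    · rfl

theorem loop_eq (fuel : Nat) (h : List Int) (k num : Int) :
    loopA fuel h k num = loopB fuel h k num := by
  induction fuel generalizing h num with
  | zero => rfl
  | succ fuel ih =>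
    rw [loopA, loopB]
    by_cases hg : h.getD 0 0 < k
    · rw [if_pos hg, if_pos hg]
      simp only [popA, popB, heapify_eq]
      rw [if_neg (by omega : ¬ h.getD 0 0 ≥ k)]
      simp only [insertA, siftUp_eq]
      split
      · rfl
      · exact ih _ _
    · rw [if_neg hg, if_neg hg]

-- ===== VERDICT =====
theorem solution_old_spec : Claim_equal_solution_old := by
  intro arr k _ _
  unfold Spec_solution_old solution_old solution_old_alt
  cases hm : PySem.List.min? arr (fun x => x) with
  | none => rfl
  | some m =>
    simp only
    by_cases hk : m ≥ k
    · rw [if_pos hk, if_pos hk]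
    · rw [if_neg hk, if_neg hk, buildA, build_eq, loop_eq]
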